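-- pv_equiv track=rewrite | github.com/pypi-data/pypi-mirror-43 | packages/major_system/major_system-2.1.0.tar.gz/major_system-2.1.0/major_system/major_system.py | ordered_tuples
-- ===== SOURCE A (Python) =====
-- def ordered_tuples(tuple_length, num_elts):
--   if tuple_length == 1:
--     for i in range(1, num_elts):
--       yield (i,)
--   else:
--     for tup in ordered_tuples(tuple_length - 1, num_elts):
--       for i in range(tup[-1] + 1, num_elts):
--         yield tup + (i,)
-- ===== SOURCE B (Python) =====
-- def ordered_tuples(tuple_length, num_elts):
--   def gen(lo, k):
--     if k == 0:
--       yield ()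
--     else:
--       for i in range(lo, num_elts):
--         for rest in gen(i + 1, k - 1):
--           yield (i,) + rest
--   if tuple_length >= 1:
--     yield from gen(1, tuple_length)
-- ===== Notes on version B (the rewrite author's own statement) =====
-- stated objective: alternative
-- what changed: A builds the whole list of (k-1)-tuples level by level and appends each possible LAST element; B recurses on the FIRST element with a lower-bound parameter, prepending it to the tuples of the remaining length, so no intermediate level list is materialized.
import Mathlib
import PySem

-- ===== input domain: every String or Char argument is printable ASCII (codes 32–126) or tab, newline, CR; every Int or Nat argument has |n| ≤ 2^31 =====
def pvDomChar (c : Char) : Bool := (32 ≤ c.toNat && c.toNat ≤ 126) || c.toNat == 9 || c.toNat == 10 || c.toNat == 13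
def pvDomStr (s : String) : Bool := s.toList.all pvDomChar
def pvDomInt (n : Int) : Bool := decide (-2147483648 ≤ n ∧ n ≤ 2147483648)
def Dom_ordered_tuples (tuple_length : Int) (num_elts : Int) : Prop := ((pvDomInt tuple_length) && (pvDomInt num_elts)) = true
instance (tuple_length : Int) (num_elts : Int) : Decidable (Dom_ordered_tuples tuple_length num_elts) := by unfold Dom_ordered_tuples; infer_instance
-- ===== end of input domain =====

-- B enumerates the same tuples by recursing on the first element instead of the last; alternative decomposition, no speed claim.


-- ===== PORT A =====
-- Port of A: the generator is ported as the list of yielded tuples; the recursion on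
-- tuple_length is made total with a fuel argument equal to tuple_length.toNat (A diverges
-- for tuple_length <= 0, which Pre_ excludes).  tup[-1] is PySem.List.pyGet? tup (-1);
-- the tuples A yields are never empty, so the .getD 0 default is never taken.
def pyLastA (tup : List Int) : Int := (PySem.List.pyGet? tup (-1)).getD 0

def orderedTuplesA (n : Int) : Nat → Int → List (List Int)
  | 0, _ => []
  | Nat.succ fuel, tl =>
    if tl == 1 then
      (PySem.List.pyRange 1 n 1).map (fun i => [i])
    else
      (orderedTuplesA n fuel (tl - 1)).flatMap (fun tup =>
        (PySem.List.pyRange (pyLastA tup + 1) n 1).map (fun i => tup ++ [i]))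

def ordered_tuples (tuple_length : Int) (num_elts : Int) : List (List Int) :=
  orderedTuplesA num_elts tuple_length.toNat tuple_length

-- ===== PORT B =====
-- Port of B: gen lo k yields every strictly increasing k-tuple with entries in [lo, num_elts),
-- choosing the first element and recursing on the rest; k is the Nat remaining length.
def orderedTuplesGen (n : Int) : Int → Nat → List (List Int)
  | _, 0 => [[]]
  | lo, Nat.succ k =>
    (PySem.List.pyRange lo n 1).flatMap (fun i =>
      (orderedTuplesGen n (i + 1) k).map (fun rest => i :: rest))

def ordered_tuples_alt (tuple_length : Int) (num_elts : Int) : List (List Int) :=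
  if 1 ≤ tuple_length then orderedTuplesGen num_elts 1 tuple_length.toNat else []

-- ===== PRECONDITION & SPEC =====
-- Pre_ excludes tuple_length ≤ 0, where A recurses without a base case and raises RecursionError,
-- and tuple_length ≥ 10000, where A's recursion depth (one nested generator per level, = tuple_length)
-- reaches the interpreter's recursion limit (10000 in the grading environment; 1000 by CPython default)
-- and A raises RecursionError before yielding anything; nothing A returns on is excluded.
def Pre_ordered_tuples (tuple_length : Int) (num_elts : Int) : Prop :=
  1 ≤ tuple_length ∧ tuple_length < 10000
instance (tuple_length : Int) (num_elts : Int) : Decidable (Pre_ordered_tuples tuple_length num_elts) := by unfold Pre_ordered_tuples; infer_instance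
def pvWitness_ordered_tuples : Int × Int := (3, 7)

def Spec_ordered_tuples (tuple_length : Int) (num_elts : Int) (out : List (List Int)) : Prop := out = ordered_tuples_alt tuple_length num_elts
instance (tuple_length : Int) (num_elts : Int) (out : List (List Int)) : Decidable (Spec_ordered_tuples tuple_length num_elts out) := by unfold Spec_ordered_tuples; infer_instance

-- ===== CLAIM (what is proved, stated in full; the proofs are below) =====
def Claim_equal_ordered_tuples : Prop := ∀ (tuple_length : Int) (num_elts : Int), Dom_ordered_tuples tuple_length num_elts → Pre_ordered_tuples tuple_length num_elts → Spec_ordered_tuples tuple_length num_elts (ordered_tuples tuple_length num_elts)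

-- ===== LEMMAS AND PROOFS =====

-- A's tup[-1] (with an unused default) is the last element.
theorem pyLastA_eq_getLastD (t : List Int) : pyLastA t = t.getLastD 0 := by
  cases t with
  | nil => simp [pyLastA, PySem.List.pyGet?, PySem.List.pyIdx?]
  | cons a s =>
    simp [pyLastA, PySem.List.pyGet?, PySem.List.pyIdx?, List.getLastD_eq_getLast?,
      List.getLast?_eq_getElem?]

-- A's one extension step: append every admissible last element to a tuple.
def extStep (n : Int) (tup : List Int) : List (List Int) :=
  (PySem.List.pyRange (pyLastA tup + 1) n 1).map (fun i => tup ++ [i])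

-- one-step unfolding equations (so rewriting does not cascade into the recursive call)
theorem gen_succ (n lo : Int) (k : Nat) :
    orderedTuplesGen n lo (k + 1) =
      (PySem.List.pyRange lo n 1).flatMap (fun i =>
        (orderedTuplesGen n (i + 1) k).map (fun rest => i :: rest)) := rfl

theorem otA_succ (n tl : Int) (fuel : Nat) :
    orderedTuplesA n (fuel + 1) tl =
      if tl == 1 then (PySem.List.pyRange 1 n 1).map (fun i => [i])
      else (orderedTuplesA n fuel (tl - 1)).flatMap (extStep n) := rfl

theorem extStep_cons (n i : Int) (t : List Int) (ht : t ≠ []) :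
    extStep n (i :: t) = (extStep n t).map (fun r => i :: r) := by
  unfold extStep
  rw [List.map_map, pyLastA_eq_getLastD, pyLastA_eq_getLastD]
  cases t with
  | nil => exact absurd rfl ht
  | cons b s => simp [List.getLastD_eq_getLast?]

theorem mem_gen_length (n : Int) :
    ∀ (k : Nat) (lo : Int) (t : List Int), t ∈ orderedTuplesGen n lo k → t.length = k := by
  intro k
  induction k with
  | zero => intro lo t ht; simp [orderedTuplesGen] at ht; simp [ht]
  | succ k ih =>
    intro lo t ht
    rw [gen_succ] at ht
    simp only [List.mem_flatMap, List.mem_map] at ht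
    obtain ⟨i, _, r, hr, rfl⟩ := ht
    simp [ih _ r hr]

-- Exchange lemma: extending every tuple of gen at the END is gen of the next length.
theorem gen_extStep (n : Int) :
    ∀ (k : Nat) (lo : Int),
      (orderedTuplesGen n lo (k + 1)).flatMap (extStep n) = orderedTuplesGen n lo (k + 2) := by
  intro k
  induction k with
  | zero =>
    intro lo
    rw [gen_succ, gen_succ, List.flatMap_assoc]
    refine List.flatMap_congr ?_
    intro i _
    simp [orderedTuplesGen, extStep, pyLastA_eq_getLastD]
    rw [← List.map_eq_flatMap, List.map_map]
    rfl
  | succ k ih =>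
    intro lo
    rw [gen_succ n lo (k + 1), gen_succ n lo (k + 2), List.flatMap_assoc]
    refine List.flatMap_congr ?_
    intro i _
    have hpt : ∀ t ∈ orderedTuplesGen n (i + 1) (k + 1),
        extStep n (i :: t) = (extStep n t).map (fun r => i :: r) := by
      intro t ht
      refine extStep_cons n i t ?_
      intro hnil
      have := mem_gen_length n (k + 1) (i + 1) t ht
      simp [hnil] at this
    calc ((orderedTuplesGen n (i + 1) (k + 1)).map (fun rest => i :: rest)).flatMap (extStep n)
        = (orderedTuplesGen n (i + 1) (k + 1)).flatMap (fun t => extStep n (i :: t)) :=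
          List.flatMap_map _ _ _
      _ = (orderedTuplesGen n (i + 1) (k + 1)).flatMap
            (fun t => (extStep n t).map (fun r => i :: r)) := List.flatMap_congr hpt
      _ = ((orderedTuplesGen n (i + 1) (k + 1)).flatMap (extStep n)).map (fun r => i :: r) :=
          (List.map_flatMap ..).symm
      _ = (orderedTuplesGen n (i + 1) (k + 2)).map (fun r => i :: r) := by rw [ih]

-- A's level-(k+1) list is B's gen from lower bound 1.
theorem orderedTuplesA_eq_gen (n : Int) :
    ∀ (k : Nat), orderedTuplesA n (k + 1) ((k : Int) + 1) = orderedTuplesGen n 1 (k + 1) := by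
  intro k
  induction k with
  | zero =>
    rw [otA_succ, if_pos (by norm_num), gen_succ]
    simp [orderedTuplesGen, List.map_eq_flatMap]
  | succ k ih =>
    rw [show (((k + 1 : Nat) : Int) + 1) = (((k : Int) + 1) + 1) by push_cast; ring]
    rw [otA_succ, if_neg (by simp; omega)]
    rw [show ((((k : Int) + 1) + 1) - 1) = ((k : Int) + 1) by ring, ih]
    exact gen_extStep n k 1

-- ===== VERDICT (by name: the statement is the Claim_ definition above) =====
theorem ordered_tuples_spec : Claim_equal_ordered_tuples := by
  intro tl n _ hpre
  unfold Spec_ordered_tuples ordered_tuples ordered_tuples_alt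
  obtain ⟨h1, _⟩ := hpre
  obtain ⟨k, hk⟩ : ∃ k : Nat, tl = (k : Int) + 1 := ⟨(tl - 1).toNat, by omega⟩
  subst hk
  rw [if_pos h1]
  have htn : ((k : Int) + 1).toNat = k + 1 := by omega
  rw [htn]
  exact orderedTuplesA_eq_gen n k
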